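-- pv_equiv track=rewrite | github.com/gaomengnan/aoc | geeksforgeeks_Ishaan Loves Chocolates/main.py | chocolates
-- ===== SOURCE A (Python) =====
-- from typing import List
--
-- def chocolates(n: int, arr: List[int]) -> int:
--     i = 0
--     j = n - 1
--     while i <= j:
--         if i == j:
--             return arr[i]
--
--         if arr[i] < arr[j]:
--             j -= 1
--         else:
--             i += 1
-- ===== SOURCE B (Python) =====
-- from typing import List
--
-- def chocolates(n: int, arr: List[int]) -> int:
--     # single forward min-scan over the first n elements (explicit indexing,
--     # so only arr[0..n-1] are ever read)
--     m = arr[0]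
--     for k in range(1, n):
--         if arr[k] < m:
--             m = arr[k]
--     return m
-- ===== Notes on version B (the rewrite author's own statement) =====
-- stated objective: simpler
-- what changed: Replaces the two-pointer elimination from both ends by a single forward minimum scan over arr[0..n-1], since the element that survives the elimination is exactly the minimum of the first n elements.
-- outside the precondition, e.g. on chocolates(0, [1]): A returns None, B returns 1; on chocolates(-3, []): A returns None, B raises IndexError
import Mathlib
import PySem

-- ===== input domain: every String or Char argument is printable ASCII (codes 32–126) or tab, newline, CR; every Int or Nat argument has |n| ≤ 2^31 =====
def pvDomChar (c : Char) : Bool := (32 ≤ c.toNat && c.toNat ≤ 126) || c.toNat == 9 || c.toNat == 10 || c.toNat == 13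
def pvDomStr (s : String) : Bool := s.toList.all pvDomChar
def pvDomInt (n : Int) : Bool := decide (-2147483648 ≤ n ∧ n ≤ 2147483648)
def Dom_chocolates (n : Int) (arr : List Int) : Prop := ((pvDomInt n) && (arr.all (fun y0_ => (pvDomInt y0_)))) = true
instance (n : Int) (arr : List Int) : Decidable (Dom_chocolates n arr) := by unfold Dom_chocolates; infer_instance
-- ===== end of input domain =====

-- B replaces A's two-pointer elimination from both ends by a single forward minimum
-- scan over the first n elements (simpler control flow, same O(n) cost).


-- ===== PORT A =====
-- A's while loop: shrink the window [i, j] from whichever end holds the larger value.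
-- PySem.List.pyGet? is Python indexing (none = IndexError); Pre_ excludes those inputs
-- and the n ≤ 0 fall-through (Python returns None there), so the final `.getD 0`
-- default is never reached on admitted inputs.
def chocLoopA (arr : List Int) (i j : Int) : Option Int :=
  if _h : i ≤ j then
    if i = j then PySem.List.pyGet? arr i
    else
      match PySem.List.pyGet? arr i, PySem.List.pyGet? arr j with
      | some a, some b =>
          if a < b then chocLoopA arr i (j - 1) else chocLoopA arr (i + 1) j
      | _, _ => none
  else none
termination_by (j - i).toNat
decreasing_by all_goals omega

def chocolates (n : Int) (arr : List Int) : Int :=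
  (chocLoopA arr 0 (n - 1)).getD 0

-- ===== PORT B =====
-- Source B: m = arr[0]; for k in range(1, n): if arr[k] < m: m = arr[k]; return m.
def chocolates_alt (n : Int) (arr : List Int) : Int :=
  match PySem.List.pyGet? arr 0 with
  | none => 0  -- IndexError in Source B; excluded by Pre_
  | some m0 =>
      ((PySem.List.pyRange 1 n 1).foldl
          (fun acc k =>
            acc.bind fun m =>
              (PySem.List.pyGet? arr k).map fun v => if v < m then v else m)
          (some m0)).getD 0

-- ===== PRECONDITION & SPEC =====
-- Pre_ excludes n ≤ 0 (A falls through its loop and returns None, not an int)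
-- and n > len(arr) (A raises IndexError).
def Pre_chocolates (n : Int) (arr : List Int) : Prop := 1 ≤ n ∧ n ≤ arr.length
instance (n : Int) (arr : List Int) : Decidable (Pre_chocolates n arr) := by
  unfold Pre_chocolates; infer_instance

def pvWitness_chocolates : Int × List Int := (3, [5, 2, 7])

def Spec_chocolates (n : Int) (arr : List Int) (out : Int) : Prop := out = chocolates_alt n arr
instance (n : Int) (arr : List Int) (out : Int) : Decidable (Spec_chocolates n arr out) := by unfold Spec_chocolates; infer_instance

-- ===== CLAIM (what is proved, stated in full; the proofs are below) =====
def Claim_equal_chocolates : Prop := ∀ (n : Int) (arr : List Int), Dom_chocolates n arr → Pre_chocolates n arr → Spec_chocolates n arr (chocolates n arr)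

-- ===== LEMMAS AND PROOFS =====

theorem min?_le_of_mem' (l : List Int) (m x : Int) (h : l.min? = some m) (hx : x ∈ l) :
    m ≤ x := (List.min?_eq_some_iff.mp h).2 x hx

theorem min?_append_singleton (l : List Int) (x m : Int) (h : l.min? = some m) :
    (l ++ [x]).min? = some (min m x) := by
  obtain ⟨hm, hle⟩ := List.min?_eq_some_iff.mp h
  apply List.min?_eq_some_iff.mpr
  refine ⟨?_, ?_⟩
  · rcases min_cases m x with ⟨h1, _⟩ | ⟨h1, _⟩ <;> simp [h1, hm]
  · intro b hb
    rcases List.mem_append.mp hb with hb | hb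
    · exact le_trans (min_le_left _ _) (hle b hb)
    · simp only [List.mem_singleton] at hb
      subst hb; exact min_le_right _ _

theorem getElem_mem_seg (arr : List Int) (a b k : Nat)
    (h1 : a ≤ k) (h2 : k < b) (h3 : b ≤ arr.length) :
    arr[k]'(by omega) ∈ (arr.drop a).take (b - a) := by
  have hk : k - a < ((arr.drop a).take (b - a)).length := by
    simp; omega
  have he : ((arr.drop a).take (b - a))[k - a] = arr[k]'(by omega) := by
    rw [List.getElem_take, List.getElem_drop]
    congr 1; omega
  exact he ▸ List.getElem_mem hk

theorem seg_min?_isSome (arr : List Int) (a b : Nat)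
    (h1 : a < b) (h3 : b ≤ arr.length) :
    ∃ m, ((arr.drop a).take (b - a)).min? = some m := by
  cases hmin : ((arr.drop a).take (b - a)).min? with
  | none =>
    have := List.min?_eq_none_iff.mp hmin
    have hmem := getElem_mem_seg arr a b a (le_refl a) h1 h3
    rw [this] at hmem
    simp at hmem
  | some m => exact ⟨m, rfl⟩

-- A's loop computes the minimum of the segment arr[i..j].
theorem chocLoopA_min (arr : List Int) (i j : Int)
    (h0 : 0 ≤ i) (hij : i ≤ j) (hj : j < arr.length) :
    chocLoopA arr i j = ((arr.drop i.toNat).take (j.toNat + 1 - i.toNat)).min? := by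
  generalize hD : (j - i).toNat = D
  induction D generalizing i j with
  | zero =>
    have hij' : i = j := by omega
    subst hij'
    have hlt : i.toNat < arr.length := by omega
    rw [chocLoopA, dif_pos (le_refl i), if_pos rfl,
        PySem.List.pyGet?_eq_some_getElem arr (i := i) h0 (by omega)]
    have hdrop : arr.drop i.toNat = arr[i.toNat] :: arr.drop (i.toNat + 1) :=
      List.drop_eq_getElem_cons hlt
    have h1 : i.toNat + 1 - i.toNat = 1 := by omega
    rw [h1, hdrop, List.take_succ_cons, List.take_zero]
    simp
  | succ D ih =>
    have hilt : i < j := by omega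
    have hiL : i.toNat < arr.length := by omega
    have hjL : j.toNat < arr.length := by omega
    rw [chocLoopA, dif_pos hij, if_neg (by omega),
        PySem.List.pyGet?_eq_some_getElem arr (i := i) h0 (by omega),
        PySem.List.pyGet?_eq_some_getElem arr (i := j) (by omega) hj]
    simp only
    by_cases hc : arr[i.toNat] < arr[j.toNat]
    · rw [if_pos hc, ih i (j - 1) (by omega) (by omega) (by omega) (by omega)]
      -- segment splits as seg i j ++ [arr[j]]
      have hj1 : (j - 1).toNat + 1 - i.toNat = j.toNat - i.toNat := by omega
      rw [hj1]
      obtain ⟨m, hm⟩ := seg_min?_isSome arr i.toNat j.toNat (by omega) (by omega)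
      have hsplit : (arr.drop i.toNat).take (j.toNat + 1 - i.toNat)
          = (arr.drop i.toNat).take (j.toNat - i.toNat) ++ [arr[j.toNat]] := by
        have h1 : j.toNat + 1 - i.toNat = (j.toNat - i.toNat) + 1 := by omega
        rw [h1, List.take_add_one]
        have hidx : (arr.drop i.toNat)[j.toNat - i.toNat]? = some arr[j.toNat] := by
          have hl : j.toNat - i.toNat < (arr.drop i.toNat).length := by simp; omega
          rw [List.getElem?_eq_getElem hl, List.getElem_drop]
          congr 2; omega
        rw [hidx]; rfl
      rw [hsplit, min?_append_singleton _ _ _ hm, hm]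
      -- min m arr[j] = m because m ≤ arr[i] < arr[j]
      have hmem_i : arr[i.toNat] ∈ (arr.drop i.toNat).take (j.toNat - i.toNat) :=
        getElem_mem_seg arr i.toNat j.toNat i.toNat (le_refl _) (by omega) (by omega)
      have : m ≤ arr[i.toNat] := min?_le_of_mem' _ _ _ hm hmem_i
      have : min m arr[j.toNat] = m := min_eq_left (by omega)
      rw [this]
    · rw [if_neg hc, ih (i + 1) j (by omega) (by omega) hj (by omega)]
      -- segment splits as arr[i] :: seg (i+1) (j+1)
      have hcons : (arr.drop i.toNat).take (j.toNat + 1 - i.toNat)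
          = arr[i.toNat] :: (arr.drop (i + 1).toNat).take (j.toNat + 1 - (i + 1).toNat) := by
        have hdrop : arr.drop i.toNat = arr[i.toNat] :: arr.drop (i.toNat + 1) :=
          List.drop_eq_getElem_cons hiL
        have h1 : j.toNat + 1 - i.toNat = (j.toNat + 1 - (i + 1).toNat) + 1 := by omega
        have h2 : (i + 1).toNat = i.toNat + 1 := by omega
        rw [h1, hdrop, List.take_succ_cons, h2]
      rw [hcons]
      obtain ⟨m, hm⟩ := seg_min?_isSome arr (i + 1).toNat (j.toNat + 1) (by omega) (by omega)
      have h2 : (j.toNat + 1) - (i + 1).toNat = j.toNat + 1 - (i + 1).toNat := rfl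
      rw [List.min?_cons, hm]
      have hmem_j : arr[j.toNat] ∈ (arr.drop (i + 1).toNat).take (j.toNat + 1 - (i + 1).toNat) :=
        getElem_mem_seg arr (i + 1).toNat (j.toNat + 1) j.toNat (by omega) (by omega) (by omega)
      have hle : m ≤ arr[j.toNat] := min?_le_of_mem' _ _ _ hm hmem_j
      have : min arr[i.toNat] m = m := min_eq_right (by omega)
      simp [this]

-- B's fold computes the minimum of the first n elements.
theorem chocFoldB_min (arr : List Int) (n : Int)
    (h1 : 1 ≤ n) (h2 : n ≤ arr.length) (harr : 0 < arr.length) :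
    (PySem.List.pyRange 1 n 1).foldl
        (fun acc k =>
          acc.bind fun m =>
            (PySem.List.pyGet? arr k).map fun v => if v < m then v else m)
        (some (arr[0]'harr))
      = (arr.take n.toNat).min? := by
  generalize hD : (n - 1).toNat = D
  induction D generalizing n with
  | zero =>
    have hn : n = 1 := by omega
    subst hn
    rw [PySem.List.pyRange_one_eq_nil (le_refl 1)]
    have hdrop : arr = arr[0] :: arr.drop 1 := (List.drop_eq_getElem_cons harr)
    conv_rhs => rw [hdrop]
    simp
  | succ D ih =>
    have hn2 : 2 ≤ n := by omega
    have hsr : PySem.List.pyRange 1 n 1 = PySem.List.pyRange 1 (n - 1) 1 ++ [n - 1] := by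
      have := PySem.List.pyRange_one_succ_right (a := 1) (b := n - 1) (by omega)
      simpa using this
    rw [hsr, List.foldl_append, ih (n - 1) (by omega) (by omega) (by omega)]
    have hex : ∃ m, (arr.take (n - 1).toNat).min? = some m := by
      have := seg_min?_isSome arr 0 (n - 1).toNat (by omega) (by omega)
      simpa using this
    obtain ⟨m, hm⟩ := hex
    rw [hm]
    simp only [List.foldl_cons, List.foldl_nil, Option.bind_some]
    rw [PySem.List.pyGet?_eq_some_getElem arr (i := n - 1) (by omega) (by omega)]
    simp only [Option.map_some]
    have hsplit : arr.take n.toNat = arr.take (n - 1).toNat ++ [arr[(n - 1).toNat]'(by omega)] := by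
      have h1 : n.toNat = (n - 1).toNat + 1 := by omega
      rw [h1, List.take_add_one,
          List.getElem?_eq_getElem (show (n - 1).toNat < arr.length by omega)]
      rfl
    rw [hsplit, min?_append_singleton _ _ _ hm]
    congr 1
    rcases lt_trichotomy (arr[(n - 1).toNat]'(by omega)) m with h | h | h
    · rw [if_pos h, min_eq_right (le_of_lt h)]
    · rw [h, if_neg (lt_irrefl m), min_self]
    · rw [if_neg (by omega), min_eq_left (le_of_lt h)]

-- ===== VERDICT (by name: the statement is the Claim_ definition above) =====
theorem chocolates_spec : Claim_equal_chocolates := by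
  intro n arr _hdom hpre
  obtain ⟨h1, h2⟩ := hpre
  have harr : 0 < arr.length := by omega
  unfold Spec_chocolates chocolates chocolates_alt
  rw [PySem.List.pyGet?_eq_some_getElem arr (i := 0) (le_refl 0) (by omega)]
  rw [chocLoopA_min arr 0 (n - 1) (le_refl 0) (by omega) (by omega)]
  simp only [Int.toNat_zero, List.drop_zero]
  rw [chocFoldB_min arr n h1 h2 harr]
  have h3 : (n - 1).toNat + 1 - 0 = n.toNat := by omega
  rw [h3]
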